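-- pv_equiv track=rewrite | github.com/hugetim/nbstata | nbstata/code_utils.py | _remove_prefixes
-- ===== SOURCE A (Python) =====
-- def _startswith_stata_abbrev(string, full_command, shortest_abbrev):
--     for j in range(len(shortest_abbrev), len(full_command)+1):
--         if string.startswith(full_command[0:j] + ' '):
--             return True
--     return False
--
-- def _remove_prefixes(std_code_line):
--     std_code_line = std_code_line.lstrip()
--     if (_startswith_stata_abbrev(std_code_line, 'quietly', 'qui')
--         or std_code_line.startswith('capture ')
--         or _startswith_stata_abbrev(std_code_line, 'noisily', 'n')):
--         return _remove_prefixes(std_code_line.split(None, maxsplit=1)[1])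
--     else:
--         return std_code_line
-- ===== SOURCE B (Python) =====
-- def _remove_prefixes(std_code_line):
--     s = std_code_line
--     n = len(s)
--     i = 0
--     while True:
--         while i < n and s[i].isspace():
--             i += 1
--         j = i
--         while j < n and not s[j].isspace():
--             j += 1
--         w = s[i:j]
--         if (((len(w) >= 3 and 'quietly'.startswith(w))
--              or w == 'capture'
--              or (len(w) >= 1 and 'noisily'.startswith(w)))
--                 and s[j:j+1] == ' '):
--             i = j
--         else:
--             return s[i:]
-- ===== Notes on version B (the rewrite author's own statement) =====
-- stated objective: alternative
-- what changed: A recursively lstrips, re-runs an abbreviation scan (up to 12 startswith tests over expansions of quietly/noisily plus a capture test) and rebuilds a fresh string via split per stripped prefix; B never builds intermediate strings: it moves an index over the original string with two inner scans (skip spaces, skip token), tests the single token against the three command names by length/prefix checks, and returns one final slice.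
import Mathlib
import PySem

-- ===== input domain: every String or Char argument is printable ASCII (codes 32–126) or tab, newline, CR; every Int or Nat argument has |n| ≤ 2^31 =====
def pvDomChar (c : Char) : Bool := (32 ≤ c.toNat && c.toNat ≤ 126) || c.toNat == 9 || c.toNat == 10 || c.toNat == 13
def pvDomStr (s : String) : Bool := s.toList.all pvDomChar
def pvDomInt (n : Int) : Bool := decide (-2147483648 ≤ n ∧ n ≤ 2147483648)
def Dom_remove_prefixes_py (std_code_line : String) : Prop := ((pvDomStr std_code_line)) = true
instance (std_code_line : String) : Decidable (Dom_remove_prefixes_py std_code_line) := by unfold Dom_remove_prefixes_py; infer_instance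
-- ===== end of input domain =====

-- B replaces A's recursion (which re-lstrips and re-splits a fresh string per step) by an in-place
-- index scanner over the original string: two index loops find the current token's bounds and a final
-- slice returns the tail; objective: alternative (no new string is built per stripped prefix).
-- Return-value equivalence only (neither version mutates its argument).

-- ===== PORT A =====

-- head of dropWhile fails the predicate (termination helper for port A)
theorem pv_head_false {p : Char → Bool} {s : List Char} {c : Char} {cs : List Char}
    (h : List.dropWhile p s = c :: cs) : p c = false := by
  have h2 : List.dropWhile p (c :: cs) = c :: cs := by
    rw [← h]; exact List.dropWhile_idempotent ..
  simpa using (List.dropWhile_eq_self_iff.mp h2) (by simp)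

-- structure of s.split(None, maxsplit=1): termination helper for port A
theorem pv_split1 (s : List Char) :
    PySem.Chars.split₀Max s 1 =
      (if List.dropWhile PySem.Chars.isspace s = [] then []
       else if List.dropWhile PySem.Chars.isspace
            (List.dropWhile (fun c => !PySem.Chars.isspace c) (List.dropWhile PySem.Chars.isspace s)) = [] then
         [List.takeWhile (fun c => !PySem.Chars.isspace c) (List.dropWhile PySem.Chars.isspace s)]
       else [List.takeWhile (fun c => !PySem.Chars.isspace c) (List.dropWhile PySem.Chars.isspace s),
             List.dropWhile PySem.Chars.isspace
               (List.dropWhile (fun c => !PySem.Chars.isspace c) (List.dropWhile PySem.Chars.isspace s))]) := by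
  have hms : ¬ ((1:Int) < 0) := by norm_num
  unfold PySem.Chars.split₀Max
  rw [if_neg hms]
  rcases s with _ | ⟨c, cs⟩
  · simp [PySem.Chars.split₀Max.go]
  · show PySem.Chars.split₀Max.go (cs.length + 1 + 1) 1 (c :: cs) [] = _
    rw [PySem.Chars.split₀Max.go]
    cases hu : List.dropWhile PySem.Chars.isspace (c :: cs) with
    | nil => simp
    | cons d ds =>
      simp only [hu]
      rw [if_neg (by norm_num)]
      rw [PySem.Chars.split₀Max.go]
      cases hr : List.dropWhile PySem.Chars.isspace
          (List.dropWhile (fun c => !PySem.Chars.isspace c) (d :: ds)) with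
      | nil => simp
      | cons e es => simp

theorem pv_rest_lt {s rest : List Char}
    (h : PySem.List.pyGet? (PySem.Chars.split₀Max s 1) 1 = some rest) : rest.length < s.length := by
  rw [pv_split1 s] at h
  by_cases h0 : List.dropWhile PySem.Chars.isspace s = []
  · rw [if_pos h0] at h; simp [PySem.List.pyGet?, PySem.List.pyIdx?] at h
  · rw [if_neg h0] at h
    by_cases h1 : List.dropWhile PySem.Chars.isspace
        (List.dropWhile (fun c => !PySem.Chars.isspace c) (List.dropWhile PySem.Chars.isspace s)) = []
    · rw [if_pos h1] at h; simp [PySem.List.pyGet?, PySem.List.pyIdx?] at h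
    · rw [if_neg h1] at h
      simp [PySem.List.pyGet?, PySem.List.pyIdx?] at h
      obtain ⟨c, cs, hu⟩ := List.exists_cons_of_ne_nil h0
      have hc : PySem.Chars.isspace c = false := pv_head_false hu
      have hw : List.takeWhile (fun c => !PySem.Chars.isspace c) (List.dropWhile PySem.Chars.isspace s) ≠ [] := by
        rw [hu, List.takeWhile_cons_of_pos (by simp [hc])]; simp
      have hsum : (List.takeWhile (fun c => !PySem.Chars.isspace c) (List.dropWhile PySem.Chars.isspace s)).length
          + (List.dropWhile (fun c => !PySem.Chars.isspace c) (List.dropWhile PySem.Chars.isspace s)).length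
          = (List.dropWhile PySem.Chars.isspace s).length := by
        rw [← List.length_append, List.takeWhile_append_dropWhile]
      have hr1 : rest.length ≤ (List.dropWhile (fun c => !PySem.Chars.isspace c) (List.dropWhile PySem.Chars.isspace s)).length := by
        rw [← h]; exact List.length_dropWhile_le _ _
      have h2 := List.length_dropWhile_le PySem.Chars.isspace s
      have h3 : 0 < (List.takeWhile (fun c => !PySem.Chars.isspace c) (List.dropWhile PySem.Chars.isspace s)).length :=
        List.length_pos_of_ne_nil hw
      omega

def startswith_stata_abbrev (string full_command shortest_abbrev : List Char) : Bool :=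
  (PySem.List.pyRange (shortest_abbrev.length : Int) ((full_command.length : Int) + 1) 1).any
    (fun j => PySem.Chars.startswith string (PySem.List.slice full_command (some 0) (some j) ++ [' ']))

def pv_removeA (s : List Char) : List Char :=
  let t := PySem.Chars.lstrip s
  if startswith_stata_abbrev t "quietly".toList "qui".toList
      || PySem.Chars.startswith t "capture ".toList
      || startswith_stata_abbrev t "noisily".toList "n".toList then
    match h : PySem.List.pyGet? (PySem.Chars.split₀Max t 1) 1 with
    | some rest => pv_removeA rest
    | none => []          -- Python raises IndexError here; these inputs are outside Pre_
  else t
termination_by s.length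
decreasing_by
  have h1 := pv_rest_lt h
  have h2 : t.length ≤ s.length := List.length_dropWhile_le PySem.Chars.isspace s
  omega

def remove_prefixes_py (std_code_line : String) : String :=
  String.ofList (pv_removeA std_code_line.toList)

-- ===== PORT B =====

-- `while i < n and s[i].isspace(): i += 1`
def pvB_ws (s : List Char) (i : Nat) : Nat :=
  if h : i < s.length then
    if PySem.Chars.isspace s[i] then pvB_ws s (i + 1) else i
  else i
termination_by s.length - i

-- `j = i; while j < n and not s[j].isspace(): j += 1`
def pvB_wd (s : List Char) (j : Nat) : Nat :=
  if h : j < s.length then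
    if !PySem.Chars.isspace s[j] then pvB_wd s (j + 1) else j
  else j
termination_by s.length - j

-- the token test on w (B's `if` condition, command part)
def pv_is_cmd (w : List Char) : Bool :=
  (decide (3 ≤ w.length) && PySem.Chars.startswith "quietly".toList w)
  || w == "capture".toList
  || (decide (1 ≤ w.length) && PySem.Chars.startswith "noisily".toList w)

theorem pvB_ws_ge (s : List Char) (i : Nat) : i ≤ pvB_ws s i := by
  induction i using pvB_ws.induct s with
  | case1 i h hs ih => rw [pvB_ws, dif_pos h, if_pos hs]; omega
  | case2 i h hs => rw [pvB_ws, dif_pos h, if_neg hs]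
  | case3 i h => rw [pvB_ws, dif_neg h]

-- in the command branch the token is nonempty, so j strictly advanced (termination helper)
theorem pv_is_cmd_pos {w : List Char} (h : pv_is_cmd w = true) : w ≠ [] := by
  rintro rfl; simp [pv_is_cmd] at h

def pvB_loop (s : List Char) (i : Nat) : List Char :=
  let i' := pvB_ws s i
  let j := pvB_wd s i'
  let w := PySem.List.slice s (some (i' : Int)) (some (j : Int))
  if h : (pv_is_cmd w
      && (PySem.List.slice s (some (j : Int)) (some ((j : Int) + 1)) == [' '])) = true then
    pvB_loop s j
  else
    PySem.List.slice s (some (i' : Int)) none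
termination_by s.length - i
decreasing_by
  have hw : pv_is_cmd (PySem.List.slice s (some ((pvB_ws s i : Nat) : Int))
      (some ((pvB_wd s (pvB_ws s i) : Nat) : Int))) = true := by
    rw [Bool.and_eq_true] at h; exact h.1
  have hne := pv_is_cmd_pos hw
  have hpos := List.length_pos_of_ne_nil hne
  rw [PySem.List.length_slice, PySem.List.clampIdx_natCast, PySem.List.clampIdx_natCast] at hpos
  have hge := pvB_ws_ge s i
  omega

def remove_prefixes_py_alt (std_code_line : String) : String :=
  String.ofList (pvB_loop std_code_line.toList 0)

-- ===== PRECONDITION & SPEC =====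
-- Pre_ excludes exactly the inputs on which Python's A raises IndexError: lines
-- whose whitespace-separated tokens are all quietly/capture/noisily abbreviations, each token
-- immediately followed by a space character (e.g. "quietly ").
def Pre_remove_prefixes_py (std_code_line : String) : Prop :=
  ¬ (PySem.Chars.split₀ std_code_line.toList ≠ [] ∧
     (∀ w ∈ PySem.Chars.split₀ std_code_line.toList, pv_is_cmd w = true) ∧
     (∀ i < std_code_line.toList.length,
        PySem.Chars.isspace std_code_line.toList[i]! = false →
        (i + 1 = std_code_line.toList.length ∨ PySem.Chars.isspace std_code_line.toList[i+1]! = true) →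
        (i + 1 < std_code_line.toList.length ∧ std_code_line.toList[i+1]! = ' ')))
instance (std_code_line : String) : Decidable (Pre_remove_prefixes_py std_code_line) := by
  unfold Pre_remove_prefixes_py; infer_instance

def pvWitness_remove_prefixes_py : String := "qui noisily list x"

def Spec_remove_prefixes_py (std_code_line : String) (out : String) : Prop := out = remove_prefixes_py_alt std_code_line
instance (std_code_line : String) (out : String) : Decidable (Spec_remove_prefixes_py std_code_line out) := by unfold Spec_remove_prefixes_py; infer_instance

-- ===== CLAIM (what is proved, stated in full; the proofs are below) =====
def Claim_equal_remove_prefixes_py : Prop := ∀ (std_code_line : String), Dom_remove_prefixes_py std_code_line → Pre_remove_prefixes_py std_code_line → Spec_remove_prefixes_py std_code_line (remove_prefixes_py std_code_line)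


-- ===== LEMMAS AND PROOFS =====

-- branch lemmas for pv_removeA (its body matches dependently, so we case it once here)
theorem pv_removeA_neg {s : List Char}
    (h : (startswith_stata_abbrev (PySem.Chars.lstrip s) "quietly".toList "qui".toList
        || PySem.Chars.startswith (PySem.Chars.lstrip s) "capture ".toList
        || startswith_stata_abbrev (PySem.Chars.lstrip s) "noisily".toList "n".toList) = false) :
    pv_removeA s = PySem.Chars.lstrip s := by
  rw [pv_removeA.eq_def]
  simp only [h, Bool.false_eq_true, if_false]

theorem pv_removeA_some {s r : List Char}
    (h : (startswith_stata_abbrev (PySem.Chars.lstrip s) "quietly".toList "qui".toList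
        || PySem.Chars.startswith (PySem.Chars.lstrip s) "capture ".toList
        || startswith_stata_abbrev (PySem.Chars.lstrip s) "noisily".toList "n".toList) = true)
    (hg : PySem.List.pyGet? (PySem.Chars.split₀Max (PySem.Chars.lstrip s) 1) 1 = some r) :
    pv_removeA s = pv_removeA r := by
  rw [pv_removeA.eq_def]
  simp only [h, if_true]
  split
  · next rest heq => rw [hg] at heq; cases heq; rfl
  · next heq => rw [hg] at heq; cases heq

theorem pv_removeA_none {s : List Char}
    (h : (startswith_stata_abbrev (PySem.Chars.lstrip s) "quietly".toList "qui".toList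
        || PySem.Chars.startswith (PySem.Chars.lstrip s) "capture ".toList
        || startswith_stata_abbrev (PySem.Chars.lstrip s) "noisily".toList "n".toList) = true)
    (hg : PySem.List.pyGet? (PySem.Chars.split₀Max (PySem.Chars.lstrip s) 1) 1 = none) :
    pv_removeA s = [] := by
  rw [pv_removeA.eq_def]
  simp only [h, if_true]
  split
  · next rest heq => rw [hg] at heq; cases heq
  · next heq => rfl

theorem pv_removeA_congr {a b : List Char}
    (h : PySem.Chars.lstrip a = PySem.Chars.lstrip b) : pv_removeA a = pv_removeA b := by
  by_cases hc : (startswith_stata_abbrev (PySem.Chars.lstrip a) "quietly".toList "qui".toList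
      || PySem.Chars.startswith (PySem.Chars.lstrip a) "capture ".toList
      || startswith_stata_abbrev (PySem.Chars.lstrip a) "noisily".toList "n".toList) = true
  · have hc' := hc; rw [h] at hc'
    cases hg : PySem.List.pyGet? (PySem.Chars.split₀Max (PySem.Chars.lstrip a) 1) 1 with
    | some r =>
      have hg' := hg; rw [h] at hg'
      rw [pv_removeA_some hc hg, pv_removeA_some hc' hg']
    | none =>
      have hg' := hg; rw [h] at hg'
      rw [pv_removeA_none hc hg, pv_removeA_none hc' hg']
  · have hcf : (startswith_stata_abbrev (PySem.Chars.lstrip a) "quietly".toList "qui".toList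
        || PySem.Chars.startswith (PySem.Chars.lstrip a) "capture ".toList
        || startswith_stata_abbrev (PySem.Chars.lstrip a) "noisily".toList "n".toList) = false := by
      rwa [Bool.not_eq_true] at hc
    have hcf' := hcf; rw [h] at hcf'
    rw [pv_removeA_neg hcf, pv_removeA_neg hcf', h]

-- the 13 command words A's prefix scan can match
def pvP13 : List (List Char) :=
  ["qui".toList, "quie".toList, "quiet".toList, "quietl".toList, "quietly".toList,
   "capture".toList,
   "n".toList, "no".toList, "noi".toList, "nois".toList, "noisi".toList, "noisil".toList, "noisily".toList]

theorem pv_condA_eq (t : List Char) :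
    (startswith_stata_abbrev t "quietly".toList "qui".toList
      || PySem.Chars.startswith t "capture ".toList
      || startswith_stata_abbrev t "noisily".toList "n".toList)
    = pvP13.any (fun p => PySem.Chars.startswith t (p ++ [' '])) := by
  have r1 : PySem.List.pyRange ("qui".toList.length : Int) (("quietly".toList.length : Int) + 1) 1 = [3,4,5,6,7] := by decide
  have r2 : PySem.List.pyRange ("n".toList.length : Int) (("noisily".toList.length : Int) + 1) 1 = [1,2,3,4,5,6,7] := by decide
  have cap : "capture ".toList = "capture".toList ++ [' '] := by decide
  have q3 : PySem.List.slice "quietly".toList (some 0) (some (3:Int)) = "qui".toList := by decide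
  have q4 : PySem.List.slice "quietly".toList (some 0) (some (4:Int)) = "quie".toList := by decide
  have q5 : PySem.List.slice "quietly".toList (some 0) (some (5:Int)) = "quiet".toList := by decide
  have q6 : PySem.List.slice "quietly".toList (some 0) (some (6:Int)) = "quietl".toList := by decide
  have q7 : PySem.List.slice "quietly".toList (some 0) (some (7:Int)) = "quietly".toList := by decide
  have n1 : PySem.List.slice "noisily".toList (some 0) (some (1:Int)) = "n".toList := by decide
  have n2 : PySem.List.slice "noisily".toList (some 0) (some (2:Int)) = "no".toList := by decide
  have n3 : PySem.List.slice "noisily".toList (some 0) (some (3:Int)) = "noi".toList := by decide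
  have n4 : PySem.List.slice "noisily".toList (some 0) (some (4:Int)) = "nois".toList := by decide
  have n5 : PySem.List.slice "noisily".toList (some 0) (some (5:Int)) = "noisi".toList := by decide
  have n6 : PySem.List.slice "noisily".toList (some 0) (some (6:Int)) = "noisil".toList := by decide
  have n7 : PySem.List.slice "noisily".toList (some 0) (some (7:Int)) = "noisily".toList := by decide
  unfold startswith_stata_abbrev
  rw [r1, r2]
  simp only [List.any_cons, List.any_nil, pvP13]
  rw [q3, q4, q5, q6, q7, n1, n2, n3, n4, n5, n6, n7, cap]
  simp only [Bool.or_false, Bool.or_assoc]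

theorem pv_isCmd_mem (w : List Char) : pv_is_cmd w = true ↔ w ∈ pvP13 := by
  constructor
  · intro h
    simp only [pv_is_cmd, Bool.or_eq_true, Bool.and_eq_true, decide_eq_true_eq, beq_iff_eq,
      PySem.Chars.startswith_iff] at h
    rcases h with (⟨hl, hpre⟩ | rfl) | ⟨hl, hpre⟩
    · have hle : w.length ≤ 7 := by simpa using hpre.length_le
      have := List.prefix_iff_eq_take.mp hpre
      interval_cases h : w.length <;> rw [this] <;> decide
    · decide
    · have hle : w.length ≤ 7 := by simpa using hpre.length_le
      have := List.prefix_iff_eq_take.mp hpre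
      interval_cases h : w.length <;> rw [this] <;> decide
  · intro h
    simp only [pvP13, List.mem_cons, List.not_mem_nil, or_false] at h
    rcases h with rfl|rfl|rfl|rfl|rfl|rfl|rfl|rfl|rfl|rfl|rfl|rfl|rfl <;> decide

theorem pv_prefix_iff (p t : List Char) (hp : ∀ c ∈ p, (!PySem.Chars.isspace c) = true) :
    (p ++ [' ']) <+: t ↔
      (List.takeWhile (fun c => !PySem.Chars.isspace c) t = p ∧
       List.take 1 (List.dropWhile (fun c => !PySem.Chars.isspace c) t) = [' ']) := by
  have hsp : ¬ ((fun c => !PySem.Chars.isspace c) ' ' = true) := by decide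
  constructor
  · rintro ⟨r, rfl⟩
    have htk : List.takeWhile (fun c => !PySem.Chars.isspace c) p = p := List.takeWhile_eq_self_iff.mpr hp
    constructor
    · rw [List.append_assoc, List.singleton_append, List.takeWhile_append, htk]
      simp
      decide
    · have hdr : List.dropWhile (fun c => !PySem.Chars.isspace c) p = [] :=
        List.dropWhile_eq_nil_iff.mpr hp
      rw [List.append_assoc, List.singleton_append, List.dropWhile_append]
      simp only [hdr, List.isEmpty_nil, if_true]
      rfl
  · rintro ⟨hw, ht1⟩
    have hsplit := List.takeWhile_append_dropWhile (p := fun c => !PySem.Chars.isspace c) (l := t)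
    cases hd : List.dropWhile (fun c => !PySem.Chars.isspace c) t with
    | nil => rw [hd] at ht1; simp at ht1
    | cons e es =>
      rw [hd] at ht1
      simp [List.take_succ_cons] at ht1
      refine ⟨es, ?_⟩
      rw [← hsplit, hw, hd, ht1]
      simp

-- A's compound condition on a string u, expressed on u's first token and the following character
theorem pv_cond_eq (u : List Char) :
    (startswith_stata_abbrev u "quietly".toList "qui".toList
      || PySem.Chars.startswith u "capture ".toList
      || startswith_stata_abbrev u "noisily".toList "n".toList)
    = (pv_is_cmd (List.takeWhile (fun c => !PySem.Chars.isspace c) u)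
       && (List.take 1 (List.dropWhile (fun c => !PySem.Chars.isspace c) u) == [' '])) := by
  have hP13 : ∀ p ∈ pvP13, ∀ ch ∈ p, (!PySem.Chars.isspace ch) = true := by
    have hb : pvP13.all (fun p => p.all (fun ch => !PySem.Chars.isspace ch)) = true := by decide
    intro p hp ch hch
    exact List.all_eq_true.mp (List.all_eq_true.mp hb p hp) ch hch
  rw [Bool.eq_iff_iff, pv_condA_eq, List.any_eq_true, Bool.and_eq_true, pv_isCmd_mem, beq_iff_eq]
  constructor
  · rintro ⟨p, hpmem, hpre⟩
    rw [PySem.Chars.startswith_iff] at hpre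
    obtain ⟨htw, h1⟩ := (pv_prefix_iff p u (hP13 p hpmem)).mp hpre
    exact ⟨htw ▸ hpmem, h1⟩
  · rintro ⟨hmem, h1⟩
    refine ⟨_, hmem, ?_⟩
    rw [PySem.Chars.startswith_iff]
    exact (pv_prefix_iff _ u (hP13 _ hmem)).mpr ⟨rfl, h1⟩

-- the space scanner lands exactly past the leading whitespace
theorem pvB_ws_drop (s : List Char) (i : Nat) :
    s.drop (pvB_ws s i) = List.dropWhile PySem.Chars.isspace (s.drop i) := by
  induction i using pvB_ws.induct s with
  | case1 i h hs ih =>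
    rw [pvB_ws, dif_pos h, if_pos hs, ih, ← List.getElem_cons_drop h,
      List.dropWhile_cons_of_pos hs]
  | case2 i h hs =>
    rw [pvB_ws, dif_pos h, if_neg hs, ← List.getElem_cons_drop h,
      List.dropWhile_cons_of_neg (by simpa using hs)]
  | case3 i h =>
    rw [pvB_ws, dif_neg h, List.drop_eq_nil_of_le (by omega), List.dropWhile_nil]

theorem pvB_wd_ge (s : List Char) (i : Nat) : i ≤ pvB_wd s i := by
  induction i using pvB_wd.induct s with
  | case1 i h hs ih => rw [pvB_wd, dif_pos h, if_pos hs]; omega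
  | case2 i h hs => rw [pvB_wd, dif_pos h, if_neg hs]
  | case3 i h => rw [pvB_wd, dif_neg h]

theorem pvB_wd_drop (s : List Char) (i : Nat) :
    s.drop (pvB_wd s i) = List.dropWhile (fun c => !PySem.Chars.isspace c) (s.drop i) := by
  induction i using pvB_wd.induct s with
  | case1 i h hs ih =>
    rw [pvB_wd, dif_pos h, if_pos hs, ih, ← List.getElem_cons_drop h,
      List.dropWhile_cons_of_pos (p := fun c => !PySem.Chars.isspace c) hs]
  | case2 i h hs =>
    rw [pvB_wd, dif_pos h, if_neg hs, ← List.getElem_cons_drop h,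
      List.dropWhile_cons_of_neg (by simpa using hs)]
  | case3 i h =>
    rw [pvB_wd, dif_neg h, List.drop_eq_nil_of_le (by omega), List.dropWhile_nil]

theorem pvB_wd_take (s : List Char) (i : Nat) :
    (s.drop i).take (pvB_wd s i - i) = List.takeWhile (fun c => !PySem.Chars.isspace c) (s.drop i) := by
  induction i using pvB_wd.induct s with
  | case1 i h hs ih =>
    have hge := pvB_wd_ge s (i + 1)
    rw [pvB_wd, dif_pos h, if_pos hs, ← List.getElem_cons_drop h,
      List.takeWhile_cons_of_pos (p := fun c => !PySem.Chars.isspace c) hs]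
    have harith : pvB_wd s (i + 1) - i = (pvB_wd s (i + 1) - (i + 1)) + 1 := by omega
    rw [harith, List.take_succ_cons, ih]
  | case2 i h hs =>
    rw [pvB_wd, dif_pos h, if_neg hs, ← List.getElem_cons_drop h, Nat.sub_self, List.take_zero,
      List.takeWhile_cons_of_neg (by simpa using hs)]
  | case3 i h =>
    rw [pvB_wd, dif_neg h, List.drop_eq_nil_of_le (by omega), List.take_nil, List.takeWhile_nil]

-- non-let unfolding of one pvB_loop step
theorem pvB_loop_eq (s : List Char) (i : Nat) :
    pvB_loop s i =
      (if (pv_is_cmd (PySem.List.slice s (some ((pvB_ws s i : Nat) : Int))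
              (some ((pvB_wd s (pvB_ws s i) : Nat) : Int)))
          && (PySem.List.slice s (some ((pvB_wd s (pvB_ws s i) : Nat) : Int))
              (some (((pvB_wd s (pvB_ws s i) : Nat) : Int) + 1)) == [' '])) = true then
        pvB_loop s (pvB_wd s (pvB_ws s i))
      else
        PySem.List.slice s (some ((pvB_ws s i : Nat) : Int)) none) := by
  rw [pvB_loop]
  simp only [dite_eq_ite]

-- main invariant: the index loop from position i computes A's recursion on s[i:]
theorem pvB_main : ∀ (n : Nat) (s : List Char) (i : Nat), s.length - i ≤ n →
    pvB_loop s i = pv_removeA (s.drop i) := by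
  intro n
  induction n with
  | zero =>
    intro s i hn
    have hdrop : s.drop i = [] := List.drop_eq_nil_of_le (by omega)
    have hi' : s.drop (pvB_ws s i) = [] := by rw [pvB_ws_drop, hdrop, List.dropWhile_nil]
    have hw : PySem.List.slice s (some ((pvB_ws s i : Nat) : Int))
        (some ((pvB_wd s (pvB_ws s i) : Nat) : Int)) = [] := by
      rw [PySem.List.slice_natCast, hi', List.take_nil]
    rw [pvB_loop_eq, hw, if_neg (by simp [pv_is_cmd]),
      PySem.List.slice_from_natCast, hi', hdrop,
      pv_removeA_neg (by decide)]
    rfl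
  | succ n ih =>
    intro s i hn
    have hu : s.drop (pvB_ws s i) = List.dropWhile PySem.Chars.isspace (s.drop i) := pvB_ws_drop s i
    set u := List.dropWhile PySem.Chars.isspace (s.drop i) with hudef
    set i' := pvB_ws s i with hi'def
    set j := pvB_wd s i' with hjdef
    have hdj : s.drop j = List.dropWhile (fun c => !PySem.Chars.isspace c) u := by
      rw [hjdef, pvB_wd_drop, hu]
    have hwtok : PySem.List.slice s (some (i' : Int)) (some (j : Int))
        = List.takeWhile (fun c => !PySem.Chars.isspace c) u := by
      rw [PySem.List.slice_natCast, hjdef, pvB_wd_take, hu]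
    have hsl1 : PySem.List.slice s (some (j : Int)) (some ((j : Int) + 1))
        = List.take 1 (List.dropWhile (fun c => !PySem.Chars.isspace c) u) := by
      have h1 := PySem.List.slice_natCast_add s j 1
      push_cast at h1
      rw [h1, hdj]
    have hlst : PySem.Chars.lstrip (s.drop i) = u := rfl
    have hcondA := pv_cond_eq u
    rw [pvB_loop_eq]
    rw [← hi'def, ← hjdef, hwtok, hsl1]
    by_cases hc : (pv_is_cmd (List.takeWhile (fun c => !PySem.Chars.isspace c) u)
        && (List.take 1 (List.dropWhile (fun c => !PySem.Chars.isspace c) u) == [' '])) = true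
    · rw [if_pos hc]
      -- bounds: the token is nonempty, so j > i
      have hbc : pv_is_cmd (List.takeWhile (fun c => !PySem.Chars.isspace c) u) = true := by
        rw [Bool.and_eq_true] at hc; exact hc.1
      have hwne := pv_is_cmd_pos hbc
      have hwpos := List.length_pos_of_ne_nil hwne
      rw [← hwtok, PySem.List.length_slice, PySem.List.clampIdx_natCast, PySem.List.clampIdx_natCast] at hwpos
      have hige := pvB_ws_ge s i
      rw [ih s j (by omega)]
      -- A takes the same step
      have hune : u ≠ [] := by
        intro h0
        rw [h0] at hwne
        simp at hwne
      have hparts := pv_split1 u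
      have huu : List.dropWhile PySem.Chars.isspace u = u := List.dropWhile_idempotent ..
      rw [huu, if_neg hune] at hparts
      have hAc : (startswith_stata_abbrev (PySem.Chars.lstrip (s.drop i)) "quietly".toList "qui".toList
          || PySem.Chars.startswith (PySem.Chars.lstrip (s.drop i)) "capture ".toList
          || startswith_stata_abbrev (PySem.Chars.lstrip (s.drop i)) "noisily".toList "n".toList) = true := by
        rw [hlst, hcondA]; exact hc
      by_cases hr : List.dropWhile PySem.Chars.isspace (List.dropWhile (fun c => !PySem.Chars.isspace c) u) = []
      · rw [if_pos hr] at hparts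
        have hg : PySem.List.pyGet? (PySem.Chars.split₀Max (PySem.Chars.lstrip (s.drop i)) 1) 1 = none := by
          rw [hlst, hparts]; simp [PySem.List.pyGet?, PySem.List.pyIdx?]
        rw [pv_removeA_none hAc hg]
        -- B recursed on s[j:], which strips to nothing
        have hjnil : PySem.Chars.lstrip (s.drop j) = [] := by
          simp only [PySem.Chars.lstrip, hdj]; exact hr
        rw [pv_removeA_neg (by rw [hjnil]; decide), hjnil]
      · rw [if_neg hr] at hparts
        have hg : PySem.List.pyGet? (PySem.Chars.split₀Max (PySem.Chars.lstrip (s.drop i)) 1) 1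
            = some (List.dropWhile PySem.Chars.isspace (List.dropWhile (fun c => !PySem.Chars.isspace c) u)) := by
          rw [hlst, hparts]; simp [PySem.List.pyGet?, PySem.List.pyIdx?]
        rw [pv_removeA_some hAc hg]
        refine pv_removeA_congr ?_
        simp only [PySem.Chars.lstrip, hdj]
        exact (List.dropWhile_idempotent ..).symm
    · rw [if_neg hc]
      have hAc : (startswith_stata_abbrev (PySem.Chars.lstrip (s.drop i)) "quietly".toList "qui".toList
          || PySem.Chars.startswith (PySem.Chars.lstrip (s.drop i)) "capture ".toList
          || startswith_stata_abbrev (PySem.Chars.lstrip (s.drop i)) "noisily".toList "n".toList) = false := by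
        rw [hlst, hcondA]; exact Bool.not_eq_true _ ▸ hc
      rw [pv_removeA_neg hAc, hlst, PySem.List.slice_from_natCast]
      exact hu

-- ===== VERDICT (by name: the statement is the Claim_ definition above) =====
theorem remove_prefixes_py_spec : Claim_equal_remove_prefixes_py := by
  intro s _ _
  unfold Spec_remove_prefixes_py remove_prefixes_py remove_prefixes_py_alt
  rw [pvB_main s.toList.length s.toList 0 (by omega), List.drop_zero]
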